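-- pv_equiv track=rewrite | github.com/buds-lab/python-for-building-analysts | ExampleScripts/VRF_IDFObjectsTemplates.py | HeatingLoopIterObjects
-- ===== SOURCE A (Python) =====
-- def HeatingLoopIterObjects(Zonelist):
--
--     ZoneHeatListObj = "  BranchList,\n\
--     Heating Demand Side Branches,  !- Name\n\
--     Heating Demand Inlet Branch,  !- Branch 1 Name\n"
--
--     counter=0
--     while counter < len(Zonelist):
--         ZoneHeatListObj += "    " + Zonelist[counter] + " HW Branch,  !- Branch Name\n"
--         counter+=1
--
--     ZoneHeatListObj += "    Heating Demand Bypass Branch,  !- Branch 8 Name\n\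
--     Heating Demand Outlet Branch;  !- Branch 9 Name\n\
--     \n\
--     Connector:Splitter,\n\
--     Heating Demand Splitter, !- Name\n\
--     Heating Demand Inlet Branch,  !- Inlet Branch Name\n"
--
--     counter=0
--     while counter < len(Zonelist):
--         ZoneHeatListObj += "    " + Zonelist[counter] + " HW Branch,  !- Branch Name\n"
--         counter+=1
--
--     ZoneHeatListObj += "    Heating Demand Bypass Branch;  !- Outlet Branch 7 Name\n\
--     \n\
--     Connector:Mixer,\n\
--     Heating Demand Mixer,    !- Name\n\
--     Heating Demand Outlet Branch,  !- Outlet Branch Name\n"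
--
--     counter=0
--     while counter < len(Zonelist):
--         ZoneHeatListObj += "    " + Zonelist[counter] + " HW Branch,  !- Branch Name\n"
--         counter+=1
--
--     ZoneHeatListObj += "    Heating Demand Bypass Branch;  !- Inlet Branch 7 Name\n\
--     \n"
--
--     return ZoneHeatListObj
-- ===== SOURCE B (Python) =====
-- def HeatingLoopIterObjects(Zonelist):
--     HEADER = "  BranchList,\n\
--     Heating Demand Side Branches,  !- Name\n\
--     Heating Demand Inlet Branch,  !- Branch 1 Name\n"
--     SPLITTER = "    Heating Demand Bypass Branch,  !- Branch 8 Name\n\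
--     Heating Demand Outlet Branch;  !- Branch 9 Name\n\
--     \n\
--     Connector:Splitter,\n\
--     Heating Demand Splitter, !- Name\n\
--     Heating Demand Inlet Branch,  !- Inlet Branch Name\n"
--     MIXER = "    Heating Demand Bypass Branch;  !- Outlet Branch 7 Name\n\
--     \n\
--     Connector:Mixer,\n\
--     Heating Demand Mixer,    !- Name\n\
--     Heating Demand Outlet Branch,  !- Outlet Branch Name\n"
--     TAIL = "    Heating Demand Bypass Branch;  !- Inlet Branch 7 Name\n\
--     \n"
--     # Work stack holding the document plan; None is the "emit one line per zone" marker.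
--     stack = [TAIL, None, MIXER, None, SPLITTER, None, HEADER]
--     parts = []
--     while stack:
--         item = stack.pop()
--         if item is None:
--             for zone in reversed(Zonelist):
--                 stack.append("    " + zone + " HW Branch,  !- Branch Name\n")
--         else:
--             parts.append(item)
--     return "".join(parts)
-- ===== Notes on version B (the rewrite author's own statement) =====
-- stated objective: alternative
-- what changed: B is a stack-driven template emitter: it pushes a 7-item document plan (four constant blocks interleaved with zone-marker sentinels) onto a work stack and runs ONE while-loop that pops items, expanding each sentinel into the zone lines, collecting the pieces and joining them once, instead of A's three separate counter-indexed while-loops appending line by line onto a growing string.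
import Mathlib
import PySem

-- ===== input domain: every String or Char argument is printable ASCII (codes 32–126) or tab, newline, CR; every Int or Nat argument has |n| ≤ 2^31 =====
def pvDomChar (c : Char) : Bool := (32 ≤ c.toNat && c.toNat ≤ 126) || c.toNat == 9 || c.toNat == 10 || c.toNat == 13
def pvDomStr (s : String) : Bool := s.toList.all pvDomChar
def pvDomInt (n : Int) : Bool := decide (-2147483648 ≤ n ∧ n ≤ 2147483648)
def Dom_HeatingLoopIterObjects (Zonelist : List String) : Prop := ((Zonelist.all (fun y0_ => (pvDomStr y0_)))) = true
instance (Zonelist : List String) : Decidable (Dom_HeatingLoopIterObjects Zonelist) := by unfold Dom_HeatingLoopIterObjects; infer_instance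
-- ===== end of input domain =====

-- B replaces A's three counter-indexed while-loops with a single stack-driven loop over a
-- 7-item document plan (constant blocks + zone-marker sentinels), joining the emitted pieces once (alternative).

-- ===== PORT A =====
-- the while-loop 'while counter < len(Zonelist): acc += "    " + Zonelist[counter] + …; counter += 1'
def pvLoopA (Zonelist : List String) (counter : Nat) (acc : String) : String :=
  if h : counter < Zonelist.length then
    pvLoopA Zonelist (counter + 1) (acc ++ "    " ++ Zonelist[counter] ++ " HW Branch,  !- Branch Name\n")
  else acc
termination_by Zonelist.length - counter

def HeatingLoopIterObjects (Zonelist : List String) : String :=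
  let s1 := "  BranchList,\n    Heating Demand Side Branches,  !- Name\n    Heating Demand Inlet Branch,  !- Branch 1 Name\n"
  let s2 := pvLoopA Zonelist 0 s1
  let s3 := s2 ++ "    Heating Demand Bypass Branch,  !- Branch 8 Name\n    Heating Demand Outlet Branch;  !- Branch 9 Name\n    \n    Connector:Splitter,\n    Heating Demand Splitter, !- Name\n    Heating Demand Inlet Branch,  !- Inlet Branch Name\n"
  let s4 := pvLoopA Zonelist 0 s3
  let s5 := s4 ++ "    Heating Demand Bypass Branch;  !- Outlet Branch 7 Name\n    \n    Connector:Mixer,\n    Heating Demand Mixer,    !- Name\n    Heating Demand Outlet Branch,  !- Outlet Branch Name\n"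
  let s6 := pvLoopA Zonelist 0 s5
  s6 ++ "    Heating Demand Bypass Branch;  !- Inlet Branch 7 Name\n    \n"

-- ===== PORT B =====
-- the while-loop over the work stack; the stack is modelled head-as-top (Python pops from the end),
-- 'none' is the zone-marker sentinel; popping it pushes the zone lines so that they pop in order
def pvEmit (Zonelist : List String) (stack : List (Option String)) (parts : List String) : List String :=
  match stack with
  | [] => parts
  | some s :: rest => pvEmit Zonelist rest (parts ++ [s])
  | none :: rest =>
      pvEmit Zonelist (Zonelist.map (fun zone => some ("    " ++ zone ++ " HW Branch,  !- Branch Name\n")) ++ rest) parts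
termination_by (stack.countP (fun x => x.isNone)) * (Zonelist.length + 1) + stack.length
decreasing_by
  all_goals simp [List.countP_cons, List.countP_append, List.countP_map, Function.comp_def, Nat.add_mul, Nat.one_mul]
  all_goals omega

def HeatingLoopIterObjects_alt (Zonelist : List String) : String :=
  let header := "  BranchList,\n    Heating Demand Side Branches,  !- Name\n    Heating Demand Inlet Branch,  !- Branch 1 Name\n"
  let splitter := "    Heating Demand Bypass Branch,  !- Branch 8 Name\n    Heating Demand Outlet Branch;  !- Branch 9 Name\n    \n    Connector:Splitter,\n    Heating Demand Splitter, !- Name\n    Heating Demand Inlet Branch,  !- Inlet Branch Name\n"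
  let mixer := "    Heating Demand Bypass Branch;  !- Outlet Branch 7 Name\n    \n    Connector:Mixer,\n    Heating Demand Mixer,    !- Name\n    Heating Demand Outlet Branch,  !- Outlet Branch Name\n"
  let tail := "    Heating Demand Bypass Branch;  !- Inlet Branch 7 Name\n    \n"
  String.join (pvEmit Zonelist [some header, none, some splitter, none, some mixer, none, some tail] [])

-- ===== PRECONDITION & SPEC =====
def Spec_HeatingLoopIterObjects (Zonelist : List String) (out : String) : Prop := out = HeatingLoopIterObjects_alt Zonelist
instance (Zonelist : List String) (out : String) : Decidable (Spec_HeatingLoopIterObjects Zonelist out) := by unfold Spec_HeatingLoopIterObjects; infer_instance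

-- ===== CLAIM (what is proved, stated in full; the proofs are below) =====
def Claim_equal_HeatingLoopIterObjects : Prop := ∀ (Zonelist : List String), Dom_HeatingLoopIterObjects Zonelist → Spec_HeatingLoopIterObjects Zonelist (HeatingLoopIterObjects Zonelist)

-- ===== LEMMAS AND PROOFS =====
theorem foldl_append_shift (l : List String) (a : String) :
    l.foldl (· ++ ·) a = a ++ l.foldl (· ++ ·) "" := by
  induction l generalizing a with
  | nil => simp [List.foldl]
  | cons b l ih =>
    simp only [List.foldl]
    rw [ih (a ++ b), ih ("" ++ b)]
    simp [String.append_assoc]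

theorem join_cons (a : String) (l : List String) :
    String.join (a :: l) = a ++ String.join l := by
  simp only [String.join, List.foldl]
  rw [foldl_append_shift]
  simp

theorem join_nil : String.join ([] : List String) = "" := by
  simp [String.join]

theorem join_append (a b : List String) :
    String.join (a ++ b) = String.join a ++ String.join b := by
  simp only [String.join, List.foldl_append]
  rw [foldl_append_shift]

theorem pvLoopA_eq (Zonelist : List String) (counter : Nat) (acc : String) :
    pvLoopA Zonelist counter acc =
      acc ++ String.join ((Zonelist.drop counter).map (fun zone => "    " ++ zone ++ " HW Branch,  !- Branch Name\n")) := by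
  rw [pvLoopA]
  split
  · rename_i h
    rw [pvLoopA_eq Zonelist (counter + 1)]
    rw [List.drop_eq_getElem_cons h, List.map_cons, join_cons]
    simp [String.append_assoc]
  · rename_i h
    rw [List.drop_of_length_le (by omega)]
    simp [String.join]
termination_by Zonelist.length - counter

-- what one stack item expands to in the final output
def pvExpand (Zonelist : List String) (item : Option String) : List String :=
  match item with
  | some s => [s]
  | none => Zonelist.map (fun zone => "    " ++ zone ++ " HW Branch,  !- Branch Name\n")

theorem pvEmit_eq (Zonelist : List String) (stack : List (Option String)) (parts : List String) :
    pvEmit Zonelist stack parts = parts ++ stack.flatMap (pvExpand Zonelist) := by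
  match stack with
  | [] => simp [pvEmit]
  | some s :: rest =>
    rw [pvEmit, pvEmit_eq Zonelist rest]
    simp [pvExpand]
  | none :: rest =>
    rw [pvEmit, pvEmit_eq Zonelist _]
    have hm : Zonelist.flatMap (fun a => ["    " ++ a ++ " HW Branch,  !- Branch Name\n"])
        = Zonelist.map (fun zone => "    " ++ zone ++ " HW Branch,  !- Branch Name\n") := by
      induction Zonelist with
      | nil => rfl
      | cons z zs ih => simp [List.flatMap_cons, ih]
    simp [pvExpand, List.flatMap_append, List.flatMap_map, Function.comp, hm]
termination_by (stack.countP (fun x => x.isNone)) * (Zonelist.length + 1) + stack.length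
decreasing_by
  all_goals simp [List.countP_cons, List.countP_append, List.countP_map, Function.comp_def, Nat.add_mul, Nat.one_mul]
  all_goals omega

-- ===== VERDICT (by name: the statement is the Claim_ definition above) =====
theorem HeatingLoopIterObjects_spec : Claim_equal_HeatingLoopIterObjects := by
  intro Zonelist _
  unfold Spec_HeatingLoopIterObjects HeatingLoopIterObjects HeatingLoopIterObjects_alt
  simp only [pvLoopA_eq, List.drop_zero, pvEmit_eq, List.flatMap_cons, List.flatMap_nil, pvExpand,
    join_append, join_cons, List.append_nil, List.nil_append, join_nil]
  simp [String.append_assoc]
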